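-- pv_equiv track=rewrite | github.com/kang2000h/Deep_Learning | Endpoint_Detecter.py | find_start_interval
-- ===== SOURCE A (Python) =====
-- def find_start_interval(energy, start_interval, IAV_thresh, check=5):
--     '''
--     :param energy: a vector of Integral Absolute Values of the energy from audio
--     :param start_interval: starting point to search start_interval
--     :param IAV_thresh: .
--     :param check: how much you wanna check energy seq whether it is more than IAV threshold or not
--     :return: A index of energy vector
--     '''
--     count = 0
--     for i in range(start_interval, len(energy)):
--         if energy[i] > IAV_thresh:
--             count += 1
--             if count==check:
--                 start_interval = i-(check-1)
--                 return start_interval # 임계값 보다 큰녀석 정해서 반환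
--         else:
--             count=0
--     return 0
-- ===== SOURCE B (Python) =====
-- def find_start_interval(energy, start_interval, IAV_thresh, check=5):
--     n = len(energy)
--     if check >= 1:
--         flags = [energy[i] > IAV_thresh for i in range(start_interval, n)]
--         m = len(flags)
--         j = 0
--         while j < m:
--             k = j
--             while k < m and flags[k] == flags[j]:
--                 k += 1
--             if flags[j] and k - j >= check:
--                 return start_interval + j
--             j = k
--     return 0
-- ===== Notes on version B (the rewrite author's own statement) =====
-- stated objective: alternative
-- what changed: Replaces A's single pass with a running consecutive counter by precomputing the list of above-threshold flags and scanning it run by run (groupby-style), returning the start of the first True run of length >= check, guarded by check >= 1.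
import Mathlib
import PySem

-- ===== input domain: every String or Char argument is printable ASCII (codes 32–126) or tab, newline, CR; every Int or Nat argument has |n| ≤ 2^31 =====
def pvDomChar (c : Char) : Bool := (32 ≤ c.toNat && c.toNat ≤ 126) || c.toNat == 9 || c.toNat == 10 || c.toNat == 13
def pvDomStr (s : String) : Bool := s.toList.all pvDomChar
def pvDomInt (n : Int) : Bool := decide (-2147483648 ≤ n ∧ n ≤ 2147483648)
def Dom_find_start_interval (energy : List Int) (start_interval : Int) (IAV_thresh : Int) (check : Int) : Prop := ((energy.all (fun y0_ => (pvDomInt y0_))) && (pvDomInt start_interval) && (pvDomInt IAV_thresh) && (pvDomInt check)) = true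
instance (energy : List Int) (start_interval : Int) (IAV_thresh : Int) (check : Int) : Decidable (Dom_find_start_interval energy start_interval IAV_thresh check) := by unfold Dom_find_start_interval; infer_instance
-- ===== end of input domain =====

-- B replaces A's running consecutive-counter with a run-scan over a precomputed boolean flag
-- list (alternative decomposition, same cost); return values agree wherever A returns.

-- ===== PORT A =====
-- A's for-loop over range(start_interval, len(energy)) with the running counter `count`;
-- pyGet? none (IndexError) yields the dummy 0 — such inputs are excluded by Pre_.
def fsiLoopA (energy : List Int) (IAV_thresh : Int) (check : Int) : List Int → Int → Int
  | [], _ => 0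
  | i :: rest, count =>
    match PySem.List.pyGet? energy i with
    | none => 0
    | some e =>
      if e > IAV_thresh then
        if count + 1 = check then i - (check - 1)
        else fsiLoopA energy IAV_thresh check rest (count + 1)
      else fsiLoopA energy IAV_thresh check rest 0

def find_start_interval (energy : List Int) (start_interval : Int) (IAV_thresh : Int) (check : Int) : Int :=
  fsiLoopA energy IAV_thresh check (PySem.List.pyRange start_interval (energy.length : Int) 1) 0

-- ===== PORT B =====
-- B's outer while loop: at offset j, the inner while finds the end of the current run
-- (= takeWhile of equal flags); a long-enough True run returns start_interval + j,
-- otherwise jump to the run's end.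
def fsiRuns (check : Int) (start : Int) (flags : List Bool) (j : Int) : Int :=
  match flags with
  | [] => 0
  | f :: rest =>
    let run := (f :: rest).takeWhile (fun x => x == f)
    let rest' := (f :: rest).dropWhile (fun x => x == f)
    if f = true ∧ check ≤ (run.length : Int) then start + j
    else fsiRuns check start rest' (j + run.length)
termination_by flags.length
decreasing_by
  simp only [List.dropWhile_cons, BEq.rfl, if_pos, List.length_cons]
  exact Nat.lt_succ_of_le (List.length_dropWhile_le _ _)

def find_start_interval_alt (energy : List Int) (start_interval : Int) (IAV_thresh : Int) (check : Int) : Int :=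
  if 1 ≤ check then
    let flags := (PySem.List.pyRange start_interval (energy.length : Int) 1).map
      (fun i => match PySem.List.pyGet? energy i with
                | none => false
                | some e => decide (e > IAV_thresh))
    fsiRuns check start_interval flags 0
  else 0

-- ===== PRECONDITION & SPEC =====
-- Pre_ excludes exactly the inputs where Python A raises IndexError
-- (an index below -len(energy) is reached by the loop).
def Pre_find_start_interval (energy : List Int) (start_interval : Int) (IAV_thresh : Int) (check : Int) : Prop :=
  -(energy.length : Int) ≤ start_interval
instance (energy : List Int) (start_interval : Int) (IAV_thresh : Int) (check : Int) : Decidable (Pre_find_start_interval energy start_interval IAV_thresh check) := by unfold Pre_find_start_interval; infer_instance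

def pvWitness_find_start_interval : List Int × Int × Int × Int := ([1, 5, 6, 2], 1, 3, 2)

def Spec_find_start_interval (energy : List Int) (start_interval : Int) (IAV_thresh : Int) (check : Int) (out : Int) : Prop := out = find_start_interval_alt energy start_interval IAV_thresh check
instance (energy : List Int) (start_interval : Int) (IAV_thresh : Int) (check : Int) (out : Int) : Decidable (Spec_find_start_interval energy start_interval IAV_thresh check out) := by unfold Spec_find_start_interval; infer_instance

-- ===== CLAIM (what is proved, stated in full; the proofs are below) =====
def Claim_equal_find_start_interval : Prop := ∀ (energy : List Int) (start_interval : Int) (IAV_thresh : Int) (check : Int), Dom_find_start_interval energy start_interval IAV_thresh check → Pre_find_start_interval energy start_interval IAV_thresh check → Spec_find_start_interval energy start_interval IAV_thresh check (find_start_interval energy start_interval IAV_thresh check)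


-- ===== LEMMAS AND PROOFS =====

-- A's loop abstracted over the boolean flag sequence: j is the current absolute index,
-- c the running counter.
def aRun (check : Int) : List Bool → Int → Int → Int
  | [], _, _ => 0
  | b :: rest, j, c =>
    if b then
      if c + 1 = check then j - (check - 1) else aRun check rest (j + 1) (c + 1)
    else aRun check rest (j + 1) 0

def flagsOf (energy : List Int) (IAV_thresh : Int) (s : Int) : List Bool :=
  (PySem.List.pyRange s (energy.length : Int) 1).map
    (fun i => match PySem.List.pyGet? energy i with
              | none => false
              | some e => decide (e > IAV_thresh))

theorem flagsOf_nil (energy : List Int) (th s : Int) (h : (energy.length : Int) ≤ s) :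
    flagsOf energy th s = [] := by
  simp [flagsOf, PySem.List.pyRange_one_eq_nil h]

theorem flagsOf_cons (energy : List Int) (th s : Int) (h : s < (energy.length : Int)) :
    flagsOf energy th s =
      (match PySem.List.pyGet? energy s with
       | none => false
       | some e => decide (e > th)) :: flagsOf energy th (s + 1) := by
  simp [flagsOf, PySem.List.pyRange_one_cons h]

theorem fsiLoopA_eq_aRun (energy : List Int) (th check : Int) :
    ∀ (fuel : ℕ) (s c : Int), ((energy.length : Int) - s).toNat ≤ fuel →
      -(energy.length : Int) ≤ s →
      fsiLoopA energy th check (PySem.List.pyRange s (energy.length : Int) 1) c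
        = aRun check (flagsOf energy th s) s c := by
  intro fuel
  induction fuel with
  | zero =>
    intro s c hf hs
    have hle : (energy.length : Int) ≤ s := by omega
    rw [PySem.List.pyRange_one_eq_nil hle, flagsOf_nil energy th s hle]
    rfl
  | succ n ih =>
    intro s c hf hs
    by_cases hlt : s < (energy.length : Int)
    · rw [PySem.List.pyRange_one_cons hlt, flagsOf_cons energy th s hlt]
      have hin : PySem.Raise.InRange energy.length s := ⟨hs, hlt⟩
      have hnone : PySem.List.pyGet? energy s ≠ none := by
        intro h
        rw [PySem.List.pyGet?_eq_none_iff] at h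
        exact h hin
      cases hg : PySem.List.pyGet? energy s with
      | none => exact absurd hg hnone
      | some e =>
        by_cases he : e > th
        · by_cases hcc : c + 1 = check
          · simp [fsiLoopA, hg, aRun, he, hcc]
          · simp only [fsiLoopA, hg, aRun, gt_iff_lt, he, decide_true, if_true, hcc, if_false]
            exact ih (s + 1) (c + 1) (by omega) (by omega)
        · simp only [fsiLoopA, hg, aRun, gt_iff_lt, he, decide_false, if_false,
            Bool.false_eq_true]
          exact ih (s + 1) 0 (by omega) (by omega)
    · have hle : (energy.length : Int) ≤ s := by omega
      rw [PySem.List.pyRange_one_eq_nil hle, flagsOf_nil energy th s hle]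
      rfl

-- check ≤ 0 : A's counter is always ≥ 0 so count+1 = check never fires; A returns 0.
theorem aRun_nonpos (check : Int) (hc : check ≤ 0) :
    ∀ (flags : List Bool) (j c : Int), 0 ≤ c → aRun check flags j c = 0 := by
  intro flags
  induction flags with
  | nil => intro j c _; rfl
  | cons b rest ih =>
    intro j c hcn
    rw [aRun]
    by_cases hb : b
    · rw [if_pos hb, if_neg (by omega)]
      exact ih (j + 1) (c + 1) (by omega)
    · rw [if_neg hb]
      exact ih (j + 1) 0 (by omega)

-- a run of m Trues: either the counter reaches check inside it and A returns j - c,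
-- or the run is consumed with counter c + m.
theorem aRun_true_run (check : Int) :
    ∀ (m : ℕ) (tail : List Bool) (j c : Int),
      aRun check (List.replicate m true ++ tail) j c =
        if c < check ∧ check ≤ c + (m : Int) then j - c
        else aRun check tail (j + m) (c + m) := by
  intro m
  induction m with
  | zero =>
    intro tail j c
    rw [if_neg (by omega)]
    simp
  | succ n ih =>
    intro tail j c
    rw [List.replicate_succ, List.cons_append, aRun, if_pos rfl]
    by_cases hcc : c + 1 = check
    · rw [if_pos hcc, if_pos (by omega)]
      omega
    · rw [if_neg hcc, ih tail (j + 1) (c + 1)]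
      by_cases h1 : c + 1 < check ∧ check ≤ c + 1 + (n : Int)
      · rw [if_pos h1, if_pos (by push_cast; omega)]
        omega
      · rw [if_neg h1, if_neg (by push_cast; omega)]
        congr 1 <;> push_cast <;> omega

-- a nonempty run of Falses resets the counter and advances j.
theorem aRun_false_run (check : Int) :
    ∀ (m : ℕ) (tail : List Bool) (j c : Int), 1 ≤ m →
      aRun check (List.replicate m false ++ tail) j c = aRun check tail (j + m) 0 := by
  intro m
  induction m with
  | zero => intro tail j c h; omega
  | succ n ih =>
    intro tail j c _
    rw [List.replicate_succ, List.cons_append, aRun, if_neg (by simp)]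
    by_cases hn : 1 ≤ n
    · rw [ih tail (j + 1) 0 hn]; congr 1; push_cast; omega
    · have : n = 0 := by omega
      subst this; simp

theorem takeWhile_eq_replicate (f : Bool) (l : List Bool) :
    l.takeWhile (fun x => x == f) = List.replicate (l.takeWhile (fun x => x == f)).length f := by
  rw [List.eq_replicate_iff]
  refine ⟨rfl, fun x hx => ?_⟩
  have := List.mem_takeWhile_imp hx
  simpa using this

theorem aRun_eq_fsiRuns (check : Int) (hc : 1 ≤ check) :
    ∀ (N : ℕ) (flags : List Bool), flags.length ≤ N → ∀ (start j : Int),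
      aRun check flags (start + j) 0 = fsiRuns check start flags j := by
  intro N
  induction N with
  | zero =>
    intro flags hlen start j
    have : flags = [] := List.length_eq_zero_iff.mp (by omega)
    subst this; simp [aRun, fsiRuns]
  | succ n ih =>
    intro flags hlen start j
    match flags with
    | [] => simp [aRun, fsiRuns]
    | f :: rest =>
      rw [fsiRuns]
      set run := (f :: rest).takeWhile (fun x => x == f) with hrun
      set rest' := (f :: rest).dropWhile (fun x => x == f) with hrest'
      have hdecomp : f :: rest = List.replicate run.length f ++ rest' := by
        conv_lhs => rw [← List.takeWhile_append_dropWhile (p := fun x => x == f) (l := f :: rest)]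
        rw [← hrun, ← hrest']
        congr 1
        exact takeWhile_eq_replicate f (f :: rest)
      have hL : 1 ≤ run.length := by
        rw [hrun]; simp
      have hrest'_len : rest'.length ≤ n := by
        have := congrArg List.length hdecomp
        simp at this
        simp at hlen
        omega
      by_cases hf : f = true
      · subst hf
        rw [hdecomp, aRun_true_run]
        by_cases hcl : check ≤ (run.length : Int)
        · rw [if_pos (by omega), if_pos ⟨rfl, hcl⟩]; omega
        · rw [if_neg (by omega), if_neg (fun h => hcl h.2)]
          have hzero : aRun check rest' (start + j + (run.length : Int)) (0 + (run.length : Int))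
              = aRun check rest' (start + j + (run.length : Int)) 0 := by
            match h0 : rest' with
            | [] => rfl
            | b :: tl =>
              have hhd : ((true :: rest).dropWhile (fun x => x == true)).head? = some b := by
                rw [← hrest']
                rfl
              have hmatch := List.head?_dropWhile_not (p := fun x => x == true) (l := true :: rest)
              rw [hhd] at hmatch
              have hb : b = false := by simpa using hmatch
              subst hb
              rw [aRun, aRun, if_neg Bool.false_ne_true, if_neg Bool.false_ne_true]
          rw [hzero]
          have := ih rest' hrest'_len start (j + (run.length : Int))
          rw [← this]; congr 1; omega
      · have hf' : f = false := Bool.eq_false_iff.mpr hf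
        subst hf'
        rw [hdecomp, aRun_false_run check run.length rest' _ _ hL,
            if_neg (fun h => Bool.false_ne_true h.1)]
        have := ih rest' hrest'_len start (j + (run.length : Int))
        rw [← this]; congr 1; omega

-- ===== VERDICT (by name: the statement is the Claim_ definition above) =====
theorem find_start_interval_spec : Claim_equal_find_start_interval := by
  intro energy s th check _ hpre
  unfold Spec_find_start_interval find_start_interval find_start_interval_alt
  rw [fsiLoopA_eq_aRun energy th check ((energy.length : Int) - s).toNat s 0 le_rfl hpre]
  by_cases hc : 1 ≤ check
  · rw [if_pos hc]
    have := aRun_eq_fsiRuns check hc (flagsOf energy th s).length (flagsOf energy th s) le_rfl s 0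
    simpa [flagsOf] using this
  · rw [if_neg hc]
    exact aRun_nonpos check (by omega) (flagsOf energy th s) s 0 le_rfl
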